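-- pv_equiv track=rewrite | github.com/takahiro-doba-research/maeda-lab-postdoc | calculation/jobcontroller/util.py | dihedral_angles_product
-- ===== SOURCE A (Python) =====
-- import itertools
--
-- def dihedral_angles_product(lines):
--     """
--     Converts
--     lines = [
--         (0, 1, {'dihedral_angles': [0]}),
--         (0, 2, {'dihedral_angles': [0]}),
--         (0, 3, {'dihedral_angles': [0, 180]}),
--         (0, 4, {'dihedral_angles': [0]}),
--         (0, 5, {'dihedral_angles': [0, 180]})
--     ]
--     to
--     iter([
--         [
--             (0, 1, {'dihedral_angle': 0}),
--             (0, 2, {'dihedral_angle': 0}),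
--             (0, 3, {'dihedral_angle': 0}),
--             (0, 4, {'dihedral_angle': 0}),
--             (0, 5, {'dihedral_angle': 0})
--         ],
--         [
--             (0, 1, {'dihedral_angle': 0}),
--             (0, 2, {'dihedral_angle': 0}),
--             (0, 3, {'dihedral_angle': 0}),
--             (0, 4, {'dihedral_angle': 0}),
--             (0, 5, {'dihedral_angle': 180})
--         ],
--         [
--             (0, 1, {'dihedral_angle': 0}),
--             (0, 2, {'dihedral_angle': 0}),
--             (0, 3, {'dihedral_angle': 180}),
--             (0, 4, {'dihedral_angle': 0}),
--             (0, 5, {'dihedral_angle': 0})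
--         ],
--         [
--             (0, 1, {'dihedral_angle': 0}),
--             (0, 2, {'dihedral_angle': 0}),
--             (0, 3, {'dihedral_angle': 180}),
--             (0, 4, {'dihedral_angle': 0}),
--             (0, 5, {'dihedral_angle': 180})
--         ]
--     ])
--     """
--     dihedral_angles_list = [line[2]["dihedral_angles"] for line in lines]
--
--     for dihedral_angles in itertools.product(*dihedral_angles_list):
--         product = [
--             (line[0], line[1], {"dihedral_angle":dihedral_angle})
--             for line, dihedral_angle in zip(lines, dihedral_angles)
--         ]
--         yield product
-- ===== SOURCE B (Python) =====
-- def dihedral_angles_product(lines):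
--     # Mixed-radix (odometer) indexing: compute the number of combinations,
--     # then decode each index k into its combination directly via suffix
--     # products (last line varies fastest, matching itertools.product).
--     angle_lists = [line[2]["dihedral_angles"] for line in lines]
--
--     def suffix_products(lists):
--         # products[i] = number of combinations of lists[i:]; last entry 1
--         if not lists:
--             return [1]
--         rest = suffix_products(lists[1:])
--         return [len(lists[0]) * rest[0]] + rest
--
--     def decode(lists, products, k):
--         # the combination at odometer index k
--         if not lists:
--             return []
--         q, r = divmod(k, products[1])
--         return [lists[0][q]] + decode(lists[1:], products[1:], r)
--
--     products = suffix_products(angle_lists)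
--     for k in range(products[0]):
--         combo = decode(angle_lists, products, k)
--         yield [
--             (line[0], line[1], {"dihedral_angle": v})
--             for line, v in zip(lines, combo)
--         ]
-- ===== Notes on version B (the rewrite author's own statement) =====
-- stated objective: alternative
-- what changed: B replaces itertools.product enumeration with mixed-radix (odometer) indexing: it counts combinations via suffix products of the per-line list lengths and decodes each index k directly into its combination with divmod, instead of composing combinations from the lists.
import Mathlib
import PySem

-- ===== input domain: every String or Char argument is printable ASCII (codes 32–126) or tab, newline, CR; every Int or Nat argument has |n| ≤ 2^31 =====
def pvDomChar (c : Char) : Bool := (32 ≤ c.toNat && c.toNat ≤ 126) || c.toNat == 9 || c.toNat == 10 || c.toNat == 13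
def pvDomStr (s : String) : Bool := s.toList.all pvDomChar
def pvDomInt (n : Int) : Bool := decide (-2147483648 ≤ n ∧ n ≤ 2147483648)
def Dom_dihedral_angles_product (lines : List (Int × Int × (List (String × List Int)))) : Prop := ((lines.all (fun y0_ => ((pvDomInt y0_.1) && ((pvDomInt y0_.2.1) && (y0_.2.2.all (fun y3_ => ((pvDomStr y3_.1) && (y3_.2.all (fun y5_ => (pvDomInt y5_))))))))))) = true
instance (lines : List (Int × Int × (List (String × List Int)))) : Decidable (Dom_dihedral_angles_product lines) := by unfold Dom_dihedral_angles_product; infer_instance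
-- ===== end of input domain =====

-- B replaces itertools.product enumeration with mixed-radix (odometer) indexing via suffix
-- products and divmod decoding; same cost, a different algorithm. Equivalence is about the
-- values of the (fully consumed) generators.

-- line[2]["dihedral_angles"]; the '.getD []' branch is unreachable under Pre_ (key present)
def pvLookup (d : List (String × List Int)) : List Int :=
  ((PySem.Dict.mk d).get? "dihedral_angles").getD []

-- ===== PORT A =====
-- itertools.product over a list of lists (last list varies fastest)
def pyProduct : List (List Int) → List (List Int)
  | [] => [[]]
  | l :: ls => l.flatMap (fun x => (pyProduct ls).map (fun rest => x :: rest))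

def dihedral_angles_product (lines : List (Int × Int × (List (String × List Int)))) : List (List (Int × Int × (List (String × Int)))) :=
  let dihedral_angles_list := lines.map (fun line => pvLookup line.2.2)
  (pyProduct dihedral_angles_list).map (fun das =>
    (lines.zip das).map (fun p => (p.1.1, p.1.2.1, [("dihedral_angle", p.2)])))

-- ===== PORT B =====
-- suffix_products(lists): products[i] = number of combinations of lists[i:]; last entry 1
-- (rest[0] is read with headD 1; the result is always nonempty, so the default is unreachable)
def pvSuffixProducts : List (List Int) → List Int
  | [] => [1]
  | l :: ls =>
      let rest := pvSuffixProducts ls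
      ((l.length : Int) * rest.headD 1) :: rest

-- decode(lists, products, k): the combination at odometer index k; products[1] and lists[0][q]
-- are read with a default that is unreachable whenever 0 ≤ k < products[0] (as in Source B's loop)
def pvDecode : List (List Int) → List Int → Int → List Int
  | [], _, _ => []
  | l :: ls, prods, k =>
      let p := (prods.drop 1).headD 1
      let q := PySem.Int.floordiv k p
      let r := PySem.Int.mod k p
      ((PySem.List.pyGet? l q).getD 0) :: pvDecode ls (prods.drop 1) r

def dihedral_angles_product_alt (lines : List (Int × Int × (List (String × List Int)))) : List (List (Int × Int × (List (String × Int)))) :=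
  let angle_lists := lines.map (fun line => pvLookup line.2.2)
  let products := pvSuffixProducts angle_lists
  (PySem.List.pyRange 0 (products.headD 1) 1).map (fun k =>
    (lines.zip (pvDecode angle_lists products k)).map
      (fun p => (p.1.1, p.1.2.1, [("dihedral_angle", p.2)])))

-- ===== PRECONDITION & SPEC =====
-- Pre_ excludes exactly the inputs on which the Python A raises KeyError (a line whose dict
-- lacks the key "dihedral_angles"); B raises there too.
def Pre_dihedral_angles_product (lines : List (Int × Int × (List (String × List Int)))) : Prop :=
  (lines.all (fun line => (PySem.Dict.mk line.2.2).contains "dihedral_angles")) = true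
instance (lines : List (Int × Int × (List (String × List Int)))) : Decidable (Pre_dihedral_angles_product lines) := by unfold Pre_dihedral_angles_product; infer_instance

def pvWitness_dihedral_angles_product : (List (Int × Int × (List (String × List Int)))) :=
  [(0, 1, [("dihedral_angles", [0, 180])]), (0, 2, [("dihedral_angles", [0])])]

def Spec_dihedral_angles_product (lines : List (Int × Int × (List (String × List Int)))) (out : List (List (Int × Int × (List (String × Int))))) : Prop := out = dihedral_angles_product_alt lines
instance (lines : List (Int × Int × (List (String × List Int)))) (out : List (List (Int × Int × (List (String × Int))))) : Decidable (Spec_dihedral_angles_product lines out) := by unfold Spec_dihedral_angles_product; infer_instance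

-- ===== CLAIM (what is proved, stated in full; the proofs are below) =====
def Claim_equal_dihedral_angles_product : Prop := ∀ (lines : List (Int × Int × (List (String × List Int)))), Dom_dihedral_angles_product lines → Pre_dihedral_angles_product lines → Spec_dihedral_angles_product lines (dihedral_angles_product lines)

-- ===== LEMMAS AND PROOFS =====

-- the head of the suffix-product list is the product of the lengths
theorem suffix_head (ls : List (List Int)) :
    (pvSuffixProducts ls).headD 1 = ((ls.map List.length).prod : Int) := by
  induction ls with
  | nil => simp [pvSuffixProducts]
  | cons l t ih =>
      have h : pvSuffixProducts (l :: t)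
          = ((l.length : Int) * (pvSuffixProducts t).headD 1) :: pvSuffixProducts t := rfl
      rw [h, List.headD_cons, ih]
      push_cast
      simp [List.prod_cons]

-- a flatMap over a list equals a flatMap over its indices
theorem flatMap_index {α β : Type} [Inhabited α] (l : List α) (g : α → List β) :
    l.flatMap g = (List.range l.length).flatMap (fun q => g (l.getD q default)) := by
  induction l with
  | nil => simp
  | cons x xs ih =>
      rw [List.flatMap_cons, List.length_cons, List.range_succ_eq_map,
        List.flatMap_cons, List.flatMap_map]
      simp [ih]

-- range of a product, split as an odometer (outer digit q, inner digit i)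
theorem range_mul_split (m P : Nat) :
    List.range (m * P) = (List.range m).flatMap (fun q => (List.range P).map (fun i => q * P + i)) := by
  induction m with
  | zero => simp
  | succ m ih =>
      rw [Nat.succ_mul, List.range_add, ih, List.range_succ, List.flatMap_append]
      simp

-- B's divmod decoding enumerates A's recursive product in the same order
theorem decode_product (als : List (List Int)) :
    (PySem.List.pyRange 0 ((pvSuffixProducts als).headD 1) 1).map
      (pvDecode als (pvSuffixProducts als)) = pyProduct als := by
  induction als with
  | nil => decide
  | cons l ls ih =>
      have hhead : (pvSuffixProducts (l :: ls)).headD 1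
          = (((l.length * (ls.map List.length).prod : Nat) : Nat) : Int) := by
        have h : pvSuffixProducts (l :: ls)
            = ((l.length : Int) * (pvSuffixProducts ls).headD 1) :: pvSuffixProducts ls := rfl
        rw [h, List.headD_cons, suffix_head]
        push_cast
        ring
      rw [hhead, PySem.List.pyRange_zero_nat, range_mul_split, List.map_flatMap,
        List.map_flatMap]
      rw [pyProduct, flatMap_index l, ih.symm, suffix_head ls,
        PySem.List.pyRange_zero_nat, List.map_map]
      apply List.flatMap_congr
      intro q hq
      simp only [List.map_map]
      apply List.map_congr_left
      intro i hi
      have hq' : q < l.length := List.mem_range.mp hq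
      have hi' : i < (ls.map List.length).prod := List.mem_range.mp hi
      have hP : 0 < (ls.map List.length).prod := lt_of_le_of_lt (Nat.zero_le i) hi'
      simp only [Function.comp_def]
      show pvDecode (l :: ls) (pvSuffixProducts (l :: ls)) ((q * (ls.map List.length).prod + i : Nat) : Int)
        = l.getD q default :: pvDecode ls (pvSuffixProducts ls) ((i : Nat) : Int)
      rw [pvDecode]
      have hdrop : (pvSuffixProducts (l :: ls)).drop 1 = pvSuffixProducts ls := by
        simp [pvSuffixProducts]
      rw [hdrop, suffix_head ls]
      have hdiv : PySem.Int.floordiv ((q * (ls.map List.length).prod + i : Nat) : Int)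
          (((ls.map List.length).prod : Nat) : Int) = ((q : Nat) : Int) := by
        rw [PySem.Int.floordiv_natCast]
        congr 1
        rw [Nat.mul_comm, Nat.mul_add_div hP, Nat.div_eq_of_lt hi', Nat.add_zero]
      have hmod : PySem.Int.mod ((q * (ls.map List.length).prod + i : Nat) : Int)
          (((ls.map List.length).prod : Nat) : Int) = ((i : Nat) : Int) := by
        rw [PySem.Int.mod_natCast]
        congr 1
        rw [Nat.add_comm, Nat.add_mul_mod_self_right]
        exact Nat.mod_eq_of_lt hi'
      rw [hdiv, hmod, PySem.List.pyGet?_natCast]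
      rfl

-- ===== VERDICT (by name: the statement is the Claim_ definition above) =====
theorem dihedral_angles_product_spec : Claim_equal_dihedral_angles_product := by
  intro lines _ _
  unfold Spec_dihedral_angles_product dihedral_angles_product dihedral_angles_product_alt
  dsimp only
  rw [← decode_product (lines.map (fun line => pvLookup line.2.2)), List.map_map]
  rfl
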